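-- pv_equiv track=rewrite | github.com/get-proofpilot/proofpilot-agent-hub | backend/site_crawler.py | _is_page_url
-- ===== SOURCE A (Python) =====
-- _SKIP_EXTENSIONS = {
--     '.jpg', '.jpeg', '.png', '.gif', '.svg', '.webp', '.ico', '.bmp',
--     '.pdf', '.doc', '.docx', '.xls', '.xlsx', '.ppt', '.pptx',
--     '.css', '.js', '.json', '.xml', '.txt', '.map',
--     '.mp4', '.mp3', '.wav', '.avi', '.mov', '.wmv',
--     '.zip', '.tar', '.gz', '.rar',
--     '.woff', '.woff2', '.ttf', '.eot', '.otf',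
-- }
--
-- def _is_page_url(path: str) -> bool:
--     """Return True if the path looks like a real page (not an asset or query)."""
--     if not path:
--         return False
--     # Skip URLs with query params or fragments
--     if '?' in path or '#' in path:
--         return False
--     # Skip asset files
--     lower = path.lower()
--     for ext in _SKIP_EXTENSIONS:
--         if lower.endswith(ext):
--             return False
--     # Skip common non-page paths
--     skip_prefixes = ('/wp-content/', '/wp-admin/', '/wp-includes/',
--                      '/wp-json/', '/feed/', '/cdn-cgi/', '/.well-known/',
--                      '/assets/', '/static/', '/images/', '/img/',
--                      '/fonts/', '/css/', '/js/')
--     for prefix in skip_prefixes: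
--         if lower.startswith(prefix):
--             return False
--     return True
-- ===== SOURCE B (Python) =====
-- _PAGE_SKIP_EXTS = frozenset(
--     'jpg jpeg png gif svg webp ico bmp pdf doc docx xls xlsx ppt pptx '
--     'css js json xml txt map mp4 mp3 wav avi mov wmv '
--     'zip tar gz rar woff woff2 ttf eot otf'.split())
--
-- _PAGE_SKIP_PREFIXES = tuple(
--     '/wp-content/ /wp-admin/ /wp-includes/ /wp-json/ /feed/ /cdn-cgi/ '
--     '/.well-known/ /assets/ /static/ /images/ /img/ /fonts/ /css/ /js/'.split())
--
--
-- def _is_page_url(path: str) -> bool: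
--     """Return True if the path looks like a real page (not an asset or query)."""
--     if not path or '?' in path or '#' in path:
--         return False
--     lower = path.lower()
--     # rpartition isolates the final extension: one set lookup instead of 36 endswith scans
--     _, dot, ext = lower.rpartition('.')
--     if dot and ext in _PAGE_SKIP_EXTS:
--         return False
--     return not lower.startswith(_PAGE_SKIP_PREFIXES)
-- ===== Notes on version B (the rewrite author's own statement) =====
-- stated objective: idiomatic
-- what changed: The 36-way endswith loop is replaced by an rpartition on the last dot that isolates the final extension for a single membership test in a dotless extension set built by split(), and the prefix loop by one startswith-with-a-tuple call; the three early-exit guards are fused into one condition.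
import Mathlib
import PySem

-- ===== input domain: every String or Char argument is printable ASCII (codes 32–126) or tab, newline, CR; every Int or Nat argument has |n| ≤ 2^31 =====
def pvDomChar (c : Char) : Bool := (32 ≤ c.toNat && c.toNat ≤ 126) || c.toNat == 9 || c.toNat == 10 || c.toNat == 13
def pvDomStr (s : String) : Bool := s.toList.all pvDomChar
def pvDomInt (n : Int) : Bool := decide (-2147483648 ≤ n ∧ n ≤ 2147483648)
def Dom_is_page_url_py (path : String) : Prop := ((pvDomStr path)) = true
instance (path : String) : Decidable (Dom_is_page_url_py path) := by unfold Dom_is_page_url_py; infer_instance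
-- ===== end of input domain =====

-- B replaces the 36 endswith scans by one rpartition-on-the-last-dot extension lookup and fuses the guards (idiomatic; same behaviour).

-- ===== PORT A =====
def pvSkipExts : List String :=
  [".jpg", ".jpeg", ".png", ".gif", ".svg", ".webp", ".ico", ".bmp",
   ".pdf", ".doc", ".docx", ".xls", ".xlsx", ".ppt", ".pptx",
   ".css", ".js", ".json", ".xml", ".txt", ".map",
   ".mp4", ".mp3", ".wav", ".avi", ".mov", ".wmv",
   ".zip", ".tar", ".gz", ".rar",
   ".woff", ".woff2", ".ttf", ".eot", ".otf"]

def pvSkipPrefixes : List String :=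
  ["/wp-content/", "/wp-admin/", "/wp-includes/",
   "/wp-json/", "/feed/", "/cdn-cgi/", "/.well-known/",
   "/assets/", "/static/", "/images/", "/img/",
   "/fonts/", "/css/", "/js/"]

def is_page_url_py (path : String) : Bool :=
  if path == "" then false
  else if PySem.Str.isIn "?" path || PySem.Str.isIn "#" path then false
  else
    let lower := PySem.Str.lower path
    -- 'for ext in _SKIP_EXTENSIONS: if lower.endswith(ext): return False'
    if pvSkipExts.any (fun ext => PySem.Str.endswith lower ext) then false
    -- 'for prefix in skip_prefixes: if lower.startswith(prefix): return False'
    else if pvSkipPrefixes.any (fun p => PySem.Str.startswith lower p) then false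
    else true

-- ===== PORT B =====
-- Source B builds its dotless extension set and its prefix tuple by splitting one literal each
def pvAltExtWords : List (List Char) :=
  (PySem.Str.split₀ "jpg jpeg png gif svg webp ico bmp pdf doc docx xls xlsx ppt pptx css js json xml txt map mp4 mp3 wav avi mov wmv zip tar gz rar woff woff2 ttf eot otf").map String.toList

def pvAltPrefixWords : List String :=
  PySem.Str.split₀ "/wp-content/ /wp-admin/ /wp-includes/ /wp-json/ /feed/ /cdn-cgi/ /.well-known/ /assets/ /static/ /images/ /img/ /fonts/ /css/ /js/"

-- exact port of lower.rpartition('.')[2] when a dot exists: the segment after the LAST dot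
def pvExtAfterLastDot (l : List Char) : List Char :=
  (l.reverse.takeWhile (fun c => c ≠ '.')).reverse

def is_page_url_py_alt (path : String) : Bool :=
  -- 'if not path or '?' in path or '#' in path: return False'
  if path == "" || PySem.Str.isIn "?" path || PySem.Str.isIn "#" path then false
  else
    let l := (PySem.Str.lower path).toList
    -- '_, dot, ext = lower.rpartition('.'); if dot and ext in _PAGE_SKIP_EXTS: return False'
    -- (dot is nonempty exactly when lower contains a dot)
    if l.contains '.' && pvAltExtWords.contains (pvExtAfterLastDot l) then false
    -- 'return not lower.startswith(_PAGE_SKIP_PREFIXES)'  (tuple startswith = any of the prefixes)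
    else !(pvAltPrefixWords.any (fun p => PySem.Chars.startswith l p.toList))

-- ===== PRECONDITION & SPEC =====
def Spec_is_page_url_py (path : String) (out : Bool) : Prop := out = is_page_url_py_alt path
instance (path : String) (out : Bool) : Decidable (Spec_is_page_url_py path out) := by unfold Spec_is_page_url_py; infer_instance

-- ===== CLAIM (what is proved, stated in full; the proofs are below) =====
def Claim_equal_is_page_url_py : Prop := ∀ (path : String), Dom_is_page_url_py path → Spec_is_page_url_py path (is_page_url_py path)

-- ===== LEMMAS AND PROOFS =====

-- (u ++ ['.']) is a prefix of r (u dot-free) iff r contains a dot and its dot-free head is exactly u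
lemma pv_prefix_dot (r : List Char) : ∀ (u : List Char), '.' ∉ u →
    ((u ++ ['.']) <+: r ↔ ('.' ∈ r ∧ r.takeWhile (fun c => c ≠ '.') = u)) := by
  induction r with
  | nil => intro u _; simp
  | cons c r' ih =>
    intro u hu
    by_cases hc : c = '.'
    · subst hc
      cases u with
      | nil => simp
      | cons a u' =>
        constructor
        · intro h
          exfalso
          have h2 : a :: (u' ++ ['.']) <+: '.' :: r' := by simpa using h
          have := (List.cons_prefix_cons.mp h2).1
          exact hu (by simp [this])
        · intro h
          exfalso
          have := h.2
          simp [List.takeWhile] at this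
    · cases u with
      | nil =>
        constructor
        · intro h
          exfalso
          have h2 : '.' :: ([] : List Char) <+: c :: r' := by simpa using h
          exact hc ((List.cons_prefix_cons.mp h2).1).symm
        · intro ⟨_, h⟩
          exfalso
          simp [List.takeWhile, hc] at h
      | cons a u' =>
        have hu' : '.' ∉ u' := fun h => hu (List.mem_cons_of_mem _ h)
        have ha : a ≠ '.' := fun h => hu (by simp [h])
        have htw : (c :: r').takeWhile (fun x => decide (x ≠ '.')) =
            c :: r'.takeWhile (fun x => decide (x ≠ '.')) := by
          simp [List.takeWhile, hc]
        constructor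
        · intro h
          have h2 : a :: (u' ++ ['.']) <+: c :: r' := by simpa using h
          obtain ⟨rfl, htail⟩ := List.cons_prefix_cons.mp h2
          have hr := (ih u' hu').mp htail
          refine ⟨List.mem_cons_of_mem _ hr.1, ?_⟩
          rw [htw, hr.2]
        · intro ⟨hmem, htweq⟩
          rw [htw] at htweq
          obtain ⟨rfl, htw'⟩ := List.cons_eq_cons.mp htweq
          have hmem' : '.' ∈ r' := by
            rcases List.mem_cons.mp hmem with h | h
            · exact absurd h.symm hc
            · exact h
          have hr := (ih u' hu').mpr ⟨hmem', htw'⟩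
          exact List.cons_prefix_cons.mpr ⟨rfl, hr⟩

-- l ends with '.'::t (t dot-free) iff l has a dot and the segment after the last dot is t
lemma pv_endswith_dot (l t : List Char) (ht : '.' ∉ t) :
    PySem.Chars.endswith l ('.' :: t) = (l.contains '.' && (pvExtAfterLastDot l == t)) := by
  rw [Bool.eq_iff_iff]
  rw [PySem.Chars.endswith_iff]
  rw [← List.reverse_prefix]
  have hrev : ('.' :: t).reverse = t.reverse ++ ['.'] := by simp
  rw [hrev, pv_prefix_dot l.reverse t.reverse (by simpa using ht)]
  simp [pvExtAfterLastDot, List.reverse_eq_iff]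

-- the endswith scan over the dotted extensions is one lookup of the last extension in the dotless set
lemma pv_any_ext (l : List Char) (exts : List (List Char)) (h : ∀ e ∈ exts, '.' ∉ e) :
    (exts.map (fun e => '.' :: e)).any (fun e => PySem.Chars.endswith l e)
      = (l.contains '.' && exts.contains (pvExtAfterLastDot l)) := by
  induction exts with
  | nil => simp
  | cons t es ih =>
    have ht : '.' ∉ t := h t (List.mem_cons_self)
    rw [List.map_cons, List.any_cons, pv_endswith_dot l t ht,
        ih (fun e he => h e (List.mem_cons_of_mem _ he))]
    have hbe : (pvExtAfterLastDot l == t) = decide (pvExtAfterLastDot l = t) := by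
      rw [Bool.eq_iff_iff]; simp
    cases hcd : l.contains '.' <;>
      simp [hbe, Bool.and_or_distrib_left]

-- ===== VERDICT (by name: the statement is the Claim_ definition above) =====
set_option maxRecDepth 40000 in
theorem is_page_url_py_spec : Claim_equal_is_page_url_py := by
  intro path _
  unfold Spec_is_page_url_py is_page_url_py is_page_url_py_alt
  cases h0 : (path == "") with
  | true => simp only [Bool.true_or, if_true]
  | false =>
    cases h1 : (PySem.Str.isIn "?" path || PySem.Str.isIn "#" path) with
    | true =>
      simp only [Bool.false_or, h1, Bool.false_eq_true, if_false, if_true]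
    | false =>
      simp only [Bool.false_or, h1, Bool.false_eq_true, if_false]
      have hconst : pvSkipExts.map String.toList = pvAltExtWords.map (fun e => '.' :: e) := by decide
      have hext : pvSkipExts.any (fun ext => PySem.Str.endswith (PySem.Str.lower path) ext)
          = ((PySem.Str.lower path).toList.contains '.' &&
             pvAltExtWords.contains (pvExtAfterLastDot (PySem.Str.lower path).toList)) := by
        have hmap : pvSkipExts.any (fun ext => PySem.Str.endswith (PySem.Str.lower path) ext)
            = (pvSkipExts.map String.toList).any
                (fun e => PySem.Chars.endswith (PySem.Str.lower path).toList e) := by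
          simp [List.any_map, Function.comp_def]
        rw [hmap, hconst, pv_any_ext _ _ (by decide)]
      have hpw : pvAltPrefixWords = pvSkipPrefixes := by decide
      have hpre : pvSkipPrefixes.any (fun p => PySem.Str.startswith (PySem.Str.lower path) p)
          = pvAltPrefixWords.any
              (fun p => PySem.Chars.startswith (PySem.Str.lower path).toList p.toList) := by
        rw [hpw]; simp
      rw [hext, hpre]
      cases hb : ((PySem.Str.lower path).toList.contains '.' &&
          pvAltExtWords.contains (pvExtAfterLastDot (PySem.Str.lower path).toList)) with
      | true => simp
      | false =>
        cases hp : pvAltPrefixWords.any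
            (fun p => PySem.Chars.startswith (PySem.Str.lower path).toList p.toList) <;> simp
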